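-- pv_equiv track=rewrite | github.com/OpenSecOps-Org/SOAR | functions/reports/setup_overview_section/app.py | get_severity_level_breakdown
-- ===== SOURCE A (Python) =====
-- def get_severity_level_breakdown(tickets):
--     summary = {
--         'CRITICAL': 0,
--         'HIGH': 0,
--         'MEDIUM': 0,
--         'LOW': 0,
--         'INFORMATIONAL': 0
--     }
--
--     for ticket in tickets:
--         severity_label = ticket.get('severity_label')
--         if severity_label in summary:
--             summary[severity_label] += 1
--
--     return summary
-- ===== SOURCE B (Python) =====
-- SEVERITY_LEVELS = ('CRITICAL', 'HIGH', 'MEDIUM', 'LOW', 'INFORMATIONAL')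
--
--
-- def get_severity_level_breakdown(tickets):
--     return {
--         level: sum(1 for t in tickets if t.get('severity_label') == level)
--         for level in SEVERITY_LEVELS
--     }
-- ===== Notes on version B (the rewrite author's own statement) =====
-- stated objective: idiomatic
-- what changed: Replaces the single incrementing pass with a mutable counter dict by a dict comprehension over the fixed five severity levels, each value computed as an independent sum-scan of the tickets for that label.
import Mathlib
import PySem

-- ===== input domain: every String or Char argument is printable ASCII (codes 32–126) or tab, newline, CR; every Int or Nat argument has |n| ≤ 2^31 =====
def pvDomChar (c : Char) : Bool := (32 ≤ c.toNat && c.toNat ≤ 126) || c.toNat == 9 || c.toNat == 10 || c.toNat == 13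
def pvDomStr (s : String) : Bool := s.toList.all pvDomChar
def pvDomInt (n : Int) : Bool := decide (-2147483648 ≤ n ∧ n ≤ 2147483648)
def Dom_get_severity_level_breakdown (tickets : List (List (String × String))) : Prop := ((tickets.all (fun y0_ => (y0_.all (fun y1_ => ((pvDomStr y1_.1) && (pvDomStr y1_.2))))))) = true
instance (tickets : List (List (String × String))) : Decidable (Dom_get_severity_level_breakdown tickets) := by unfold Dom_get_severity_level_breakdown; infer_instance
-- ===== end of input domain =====

-- B counts each of the five fixed severity labels by its own scan (dict comprehension over the
-- levels) instead of A's single incrementing pass over a mutable counter dict; same result.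

-- ===== PORT A =====
-- loop body of A: severity_label = ticket.get('severity_label'); if severity_label in summary: summary[severity_label] += 1
def sevA_step (summary : PySem.Dict String Int) (ticket : List (String × String)) : PySem.Dict String Int :=
  match PySem.Dict.get? (PySem.Dict.mk ticket) "severity_label" with
  | some sl => if summary.contains sl then summary.modify sl 0 (· + 1) else summary
  | none => summary

def get_severity_level_breakdown (tickets : List (List (String × String))) : List (String × Int) :=
  (tickets.foldl sevA_step
    (PySem.Dict.mk [("CRITICAL", 0), ("HIGH", 0), ("MEDIUM", 0), ("LOW", 0), ("INFORMATIONAL", 0)])).items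

-- ===== PORT B =====
-- sum(1 for t in tickets if t.get('severity_label') == level)
def sevCount (tickets : List (List (String × String))) (level : String) : Int :=
  tickets.foldl
    (fun acc t => if PySem.Dict.get? (PySem.Dict.mk t) "severity_label" = some level then acc + 1 else acc) 0

def get_severity_level_breakdown_alt (tickets : List (List (String × String))) : List (String × Int) :=
  ["CRITICAL", "HIGH", "MEDIUM", "LOW", "INFORMATIONAL"].map (fun level => (level, sevCount tickets level))

-- ===== PRECONDITION & SPEC =====
def Spec_get_severity_level_breakdown (tickets : List (List (String × String))) (out : List (String × Int)) : Prop := out = get_severity_level_breakdown_alt tickets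
instance (tickets : List (List (String × String))) (out : List (String × Int)) : Decidable (Spec_get_severity_level_breakdown tickets out) := by unfold Spec_get_severity_level_breakdown; infer_instance

-- ===== CLAIM (what is proved, stated in full; the proofs are below) =====
def Claim_equal_get_severity_level_breakdown : Prop := ∀ (tickets : List (List (String × String))), Dom_get_severity_level_breakdown tickets → Spec_get_severity_level_breakdown tickets (get_severity_level_breakdown tickets)

-- ===== LEMMAS AND PROOFS =====

-- shifting the accumulator of B's counting fold
lemma sevCount_acc (tickets : List (List (String × String))) (level : String) (acc : Int) :
    tickets.foldl
      (fun acc t => if PySem.Dict.get? (PySem.Dict.mk t) "severity_label" = some level then acc + 1 else acc) acc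
    = acc + sevCount tickets level := by
  induction tickets generalizing acc with
  | nil => simp [sevCount]
  | cons t ts ih =>
    simp only [sevCount, List.foldl_cons]
    rw [ih, ih]
    split_ifs <;> simp only [sevCount] <;> omega

lemma sevCount_cons (t : List (String × String)) (ts : List (List (String × String))) (level : String) :
    sevCount (t :: ts) level
    = (if PySem.Dict.get? (PySem.Dict.mk t) "severity_label" = some level then 1 else 0) + sevCount ts level := by
  simp only [sevCount, List.foldl_cons]
  rw [sevCount_acc]
  split_ifs <;> simp only [sevCount] <;> omega

-- one step of A's loop on the five-slot state, written with B's per-label indicator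
lemma sevA_step_eq (a b c d e : Int) (t : List (String × String)) :
    sevA_step (PySem.Dict.mk [("CRITICAL", a), ("HIGH", b), ("MEDIUM", c), ("LOW", d), ("INFORMATIONAL", e)]) t
    = PySem.Dict.mk
       [("CRITICAL", a + (if PySem.Dict.get? (PySem.Dict.mk t) "severity_label" = some "CRITICAL" then 1 else 0)),
        ("HIGH", b + (if PySem.Dict.get? (PySem.Dict.mk t) "severity_label" = some "HIGH" then 1 else 0)),
        ("MEDIUM", c + (if PySem.Dict.get? (PySem.Dict.mk t) "severity_label" = some "MEDIUM" then 1 else 0)),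
        ("LOW", d + (if PySem.Dict.get? (PySem.Dict.mk t) "severity_label" = some "LOW" then 1 else 0)),
        ("INFORMATIONAL", e + (if PySem.Dict.get? (PySem.Dict.mk t) "severity_label" = some "INFORMATIONAL" then 1 else 0))] := by
  unfold sevA_step
  cases hsl : PySem.Dict.get? (PySem.Dict.mk t) "severity_label" with
  | none => simp
  | some sl =>
    by_cases h1 : sl = "CRITICAL"
    · subst h1; simp [PySem.Dict.contains, PySem.Dict.modify, PySem.Dict.get?, PySem.Dict.insert,
        PySem.Dict.getD]
    · by_cases h2 : sl = "HIGH"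
      · subst h2; simp [PySem.Dict.contains, PySem.Dict.modify, PySem.Dict.get?, PySem.Dict.insert,
          PySem.Dict.getD]
      · by_cases h3 : sl = "MEDIUM"
        · subst h3; simp [PySem.Dict.contains, PySem.Dict.modify, PySem.Dict.get?, PySem.Dict.insert,
            PySem.Dict.getD]
        · by_cases h4 : sl = "LOW"
          · subst h4; simp [PySem.Dict.contains, PySem.Dict.modify, PySem.Dict.get?, PySem.Dict.insert,
              PySem.Dict.getD]
          · by_cases h5 : sl = "INFORMATIONAL"
            · subst h5; simp [PySem.Dict.contains, PySem.Dict.modify, PySem.Dict.get?, PySem.Dict.insert,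
                PySem.Dict.getD]
            · simp [PySem.Dict.contains, h1, h2, h3, h4, h5, Ne.symm h1, Ne.symm h2, Ne.symm h3, Ne.symm h4, Ne.symm h5]

-- the loop invariant: A's fold from a generic five-slot state adds B's per-label counts
lemma sevA_loop (tickets : List (List (String × String))) (a b c d e : Int) :
    (tickets.foldl sevA_step
      (PySem.Dict.mk [("CRITICAL", a), ("HIGH", b), ("MEDIUM", c), ("LOW", d), ("INFORMATIONAL", e)])).items
    = [("CRITICAL", a + sevCount tickets "CRITICAL"),
       ("HIGH", b + sevCount tickets "HIGH"),
       ("MEDIUM", c + sevCount tickets "MEDIUM"),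
       ("LOW", d + sevCount tickets "LOW"),
       ("INFORMATIONAL", e + sevCount tickets "INFORMATIONAL")] := by
  induction tickets generalizing a b c d e with
  | nil => simp [sevCount]
  | cons t ts ih =>
    rw [List.foldl_cons, sevA_step_eq, ih]
    simp only [sevCount_cons]
    simp [add_assoc]

-- ===== VERDICT (by name: the statement is the Claim_ definition above) =====
theorem get_severity_level_breakdown_spec : Claim_equal_get_severity_level_breakdown := by
  intro tickets _
  show get_severity_level_breakdown tickets = get_severity_level_breakdown_alt tickets
  unfold get_severity_level_breakdown get_severity_level_breakdown_alt
  rw [sevA_loop]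
  simp
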